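-- pv_equiv track=rewrite | github.com/rjdscott/k2-market-data-platform | src/k2/ingestion/binance_client.py | parse_binance_symbol
-- ===== SOURCE A (Python) =====
-- def parse_binance_symbol(symbol: str) -> tuple[str, str, str]:
--     """
--     Parse Binance symbol into base asset, quote asset, and quote currency.
--
--     Args:
--         symbol: Binance symbol (e.g., BTCUSDT, ETHBTC, BNBEUR)
--
--     Returns:
--         (base_asset, quote_asset, quote_currency)
--
--     Examples:
--         >>> parse_binance_symbol("BTCUSDT")
--         ("BTC", "USDT", "USDT")
--         >>> parse_binance_symbol("ETHBTC")
--         ("ETH", "BTC", "BTC")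
--         >>> parse_binance_symbol("BNBEUR")
--         ("BNB", "EUR", "EUR")
--     """
--     # Common quote currencies (order matters - check longest first)
--     quote_currencies = [
--         "USDT",
--         "USDC",
--         "BUSD",
--         "TUSD",
--         "USDP",  # Stablecoins
--         "BTC",
--         "ETH",
--         "BNB",  # Crypto
--         "EUR",
--         "GBP",
--         "AUD",
--         "USD",  # Fiat
--         "TRY",
--         "ZAR",
--         "UAH",
--         "NGN",  # Other fiat
--     ]
--
--     for quote in quote_currencies:
--         if symbol.endswith(quote):
--             base_asset = symbol[: -len(quote)]
--             return (base_asset, quote, quote)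
--
--     # Fallback: assume last 4 chars are quote (USDT pattern)
--     return (symbol[:-4], symbol[-4:], symbol[-4:])
-- ===== SOURCE B (Python) =====
-- # Two fixed-length suffix probes against sets grouped by quote length, instead of an ordered linear endswith scan.
-- _FOUR = frozenset({"USDT", "USDC", "BUSD", "TUSD", "USDP"})
-- _THREE = frozenset({"BTC", "ETH", "BNB", "EUR", "GBP", "AUD", "USD", "TRY", "ZAR", "UAH", "NGN"})
--
--
-- def parse_binance_symbol(symbol: str) -> tuple[str, str, str]:
--     q4 = symbol[-4:]
--     if q4 in _FOUR:
--         return (symbol[:-4], q4, q4)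
--     q3 = symbol[-3:]
--     if q3 in _THREE:
--         return (symbol[:-3], q3, q3)
--     return (symbol[:-4], q4, q4)
-- ===== Notes on version B (the rewrite author's own statement) =====
-- stated objective: idiomatic
-- what changed: Replaces the ordered 16-way endswith scan with two fixed-length suffix slices looked up in length-grouped sets (4-char quotes, then 3-char quotes), exact because all 4-char quotes precede all 3-char quotes in A's list.
import Mathlib
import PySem

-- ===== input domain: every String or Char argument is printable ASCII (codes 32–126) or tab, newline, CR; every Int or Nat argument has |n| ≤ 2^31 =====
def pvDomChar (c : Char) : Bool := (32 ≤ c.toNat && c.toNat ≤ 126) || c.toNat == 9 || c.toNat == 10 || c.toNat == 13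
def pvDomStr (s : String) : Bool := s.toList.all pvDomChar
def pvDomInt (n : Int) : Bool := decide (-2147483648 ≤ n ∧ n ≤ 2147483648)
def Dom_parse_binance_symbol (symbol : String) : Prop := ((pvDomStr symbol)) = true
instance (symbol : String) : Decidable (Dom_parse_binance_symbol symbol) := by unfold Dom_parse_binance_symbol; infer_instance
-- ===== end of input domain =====

-- B replaces A's ordered 16-way endswith scan by two fixed-length suffix probes into length-grouped sets (idiomatic; same results).

-- ===== PORT A =====
def pbsQuotes : List String :=
  ["USDT", "USDC", "BUSD", "TUSD", "USDP",
   "BTC", "ETH", "BNB",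
   "EUR", "GBP", "AUD", "USD",
   "TRY", "ZAR", "UAH", "NGN"]

-- the early-return for-loop of A, as structural recursion over the quote list
def pbsLoop (symbol : String) : List String → Option (String × String × String)
  | [] => none
  | q :: rest =>
      if PySem.Str.endswith symbol q then
        some (PySem.Str.slice symbol none (some (-(PySem.Str.len q))), q, q)
      else pbsLoop symbol rest

def parse_binance_symbol (symbol : String) : String × String × String :=
  match pbsLoop symbol pbsQuotes with
  | some r => r
  | none =>
      (PySem.Str.slice symbol none (some (-4)),
       PySem.Str.slice symbol (some (-4)) none,
       PySem.Str.slice symbol (some (-4)) none)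

-- ===== PORT B =====
def pbsFour : List String := ["USDT", "USDC", "BUSD", "TUSD", "USDP"]
def pbsThree : List String := ["BTC", "ETH", "BNB", "EUR", "GBP", "AUD", "USD", "TRY", "ZAR", "UAH", "NGN"]

def parse_binance_symbol_alt (symbol : String) : String × String × String :=
  let q4 := PySem.Str.slice symbol (some (-4)) none
  if q4 ∈ pbsFour then
    (PySem.Str.slice symbol none (some (-4)), q4, q4)
  else
    let q3 := PySem.Str.slice symbol (some (-3)) none
    if q3 ∈ pbsThree then
      (PySem.Str.slice symbol none (some (-3)), q3, q3)
    else
      (PySem.Str.slice symbol none (some (-4)), q4, q4)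

-- ===== PRECONDITION & SPEC =====
def Spec_parse_binance_symbol (symbol : String) (out : String × String × String) : Prop := out = parse_binance_symbol_alt symbol
instance (symbol : String) (out : String × String × String) : Decidable (Spec_parse_binance_symbol symbol out) := by unfold Spec_parse_binance_symbol; infer_instance

-- ===== CLAIM (what is proved, stated in full; the proofs are below) =====
def Claim_equal_parse_binance_symbol : Prop := ∀ (symbol : String), Dom_parse_binance_symbol symbol → Spec_parse_binance_symbol symbol (parse_binance_symbol symbol)

-- ===== LEMMAS AND PROOFS =====

-- endswith by a 4-char quote is the same test as "the last-4 slice equals the quote"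
theorem pbs_es4 (s q : String) (hq : q.toList.length = 4) :
    PySem.Str.endswith s q = true ↔ PySem.Str.slice s (some (-4)) none = q := by
  have hs : (PySem.Str.slice s (some (-4)) none).toList = s.toList.drop (s.toList.length - 4) := by
    rw [PySem.Str.toList_slice, PySem.Chars.slice_eq_listSlice,
      PySem.List.slice_from_neg_ofNat _ 4 (by norm_num)]
  rw [PySem.Str.endswith_eq, PySem.Chars.endswith_iff, List.suffix_iff_eq_drop, hq,
    ← String.toList_inj, hs]
  exact eq_comm

-- endswith by a 3-char quote is the same test as "the last-3 slice equals the quote"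
theorem pbs_es3 (s q : String) (hq : q.toList.length = 3) :
    PySem.Str.endswith s q = true ↔ PySem.Str.slice s (some (-3)) none = q := by
  have hs : (PySem.Str.slice s (some (-3)) none).toList = s.toList.drop (s.toList.length - 3) := by
    rw [PySem.Str.toList_slice, PySem.Chars.slice_eq_listSlice,
      PySem.List.slice_from_neg_ofNat _ 3 (by norm_num)]
  rw [PySem.Str.endswith_eq, PySem.Chars.endswith_iff, List.suffix_iff_eq_drop, hq,
    ← String.toList_inj, hs]
  exact eq_comm

-- ===== VERDICT (by name: the statement is the Claim_ definition above) =====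
theorem parse_binance_symbol_spec : Claim_equal_parse_binance_symbol := by
  intro symbol _
  unfold Spec_parse_binance_symbol parse_binance_symbol parse_binance_symbol_alt pbsQuotes pbsFour pbsThree
  have e4_0 := pbs_es4 symbol "USDT" (by decide)
  have e4_1 := pbs_es4 symbol "USDC" (by decide)
  have e4_2 := pbs_es4 symbol "BUSD" (by decide)
  have e4_3 := pbs_es4 symbol "TUSD" (by decide)
  have e4_4 := pbs_es4 symbol "USDP" (by decide)
  have e3_0 := pbs_es3 symbol "BTC" (by decide)
  have e3_1 := pbs_es3 symbol "ETH" (by decide)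
  have e3_2 := pbs_es3 symbol "BNB" (by decide)
  have e3_3 := pbs_es3 symbol "EUR" (by decide)
  have e3_4 := pbs_es3 symbol "GBP" (by decide)
  have e3_5 := pbs_es3 symbol "AUD" (by decide)
  have e3_6 := pbs_es3 symbol "USD" (by decide)
  have e3_7 := pbs_es3 symbol "TRY" (by decide)
  have e3_8 := pbs_es3 symbol "ZAR" (by decide)
  have e3_9 := pbs_es3 symbol "UAH" (by decide)
  have e3_10 := pbs_es3 symbol "NGN" (by decide)
  have l4_0 : PySem.Str.len "USDT" = (4 : Int) := by decide
  have l4_1 : PySem.Str.len "USDC" = (4 : Int) := by decide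
  have l4_2 : PySem.Str.len "BUSD" = (4 : Int) := by decide
  have l4_3 : PySem.Str.len "TUSD" = (4 : Int) := by decide
  have l4_4 : PySem.Str.len "USDP" = (4 : Int) := by decide
  have l3_0 : PySem.Str.len "BTC" = (3 : Int) := by decide
  have l3_1 : PySem.Str.len "ETH" = (3 : Int) := by decide
  have l3_2 : PySem.Str.len "BNB" = (3 : Int) := by decide
  have l3_3 : PySem.Str.len "EUR" = (3 : Int) := by decide
  have l3_4 : PySem.Str.len "GBP" = (3 : Int) := by decide
  have l3_5 : PySem.Str.len "AUD" = (3 : Int) := by decide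
  have l3_6 : PySem.Str.len "USD" = (3 : Int) := by decide
  have l3_7 : PySem.Str.len "TRY" = (3 : Int) := by decide
  have l3_8 : PySem.Str.len "ZAR" = (3 : Int) := by decide
  have l3_9 : PySem.Str.len "UAH" = (3 : Int) := by decide
  have l3_10 : PySem.Str.len "NGN" = (3 : Int) := by decide
  simp only [pbsLoop]
  simp only [e4_0, e4_1, e4_2, e4_3, e4_4, e3_0, e3_1, e3_2, e3_3, e3_4, e3_5, e3_6, e3_7, e3_8, e3_9, e3_10, l4_0, l4_1, l4_2, l4_3, l4_4, l3_0, l3_1, l3_2, l3_3, l3_4, l3_5, l3_6, l3_7, l3_8, l3_9, l3_10, List.mem_cons, List.not_mem_nil, or_false]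
  clear e4_0 e4_1 e4_2 e4_3 e4_4 e3_0 e3_1 e3_2 e3_3 e3_4 e3_5 e3_6 e3_7 e3_8 e3_9 e3_10 l4_0 l4_1 l4_2 l4_3 l4_4 l3_0 l3_1 l3_2 l3_3 l3_4 l3_5 l3_6 l3_7 l3_8 l3_9 l3_10
  generalize PySem.Str.slice symbol (some (-4)) none = q4
  generalize PySem.Str.slice symbol (some (-3)) none = q3
  by_cases h0 : q4 = "USDT"
  · rw [if_pos h0, if_pos (Or.inl h0), h0]
  by_cases h1 : q4 = "USDC"
  · rw [if_neg h0, if_pos h1, if_pos (Or.inr (Or.inl h1)), h1]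
  by_cases h2 : q4 = "BUSD"
  · rw [if_neg h0, if_neg h1, if_pos h2, if_pos (Or.inr (Or.inr (Or.inl h2))), h2]
  by_cases h3 : q4 = "TUSD"
  · rw [if_neg h0, if_neg h1, if_neg h2, if_pos h3, if_pos (Or.inr (Or.inr (Or.inr (Or.inl h3)))), h3]
  by_cases h4 : q4 = "USDP"
  · rw [if_neg h0, if_neg h1, if_neg h2, if_neg h3, if_pos h4, if_pos (Or.inr (Or.inr (Or.inr (Or.inr (h4))))), h4]
  by_cases h5 : q3 = "BTC"
  · rw [if_neg h0, if_neg h1, if_neg h2, if_neg h3, if_neg h4, if_pos h5, if_neg (not_or.mpr ⟨h0, not_or.mpr ⟨h1, not_or.mpr ⟨h2, not_or.mpr ⟨h3, h4⟩⟩⟩⟩), if_pos (Or.inl h5), h5]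
  by_cases h6 : q3 = "ETH"
  · rw [if_neg h0, if_neg h1, if_neg h2, if_neg h3, if_neg h4, if_neg h5, if_pos h6, if_neg (not_or.mpr ⟨h0, not_or.mpr ⟨h1, not_or.mpr ⟨h2, not_or.mpr ⟨h3, h4⟩⟩⟩⟩), if_pos (Or.inr (Or.inl h6)), h6]
  by_cases h7 : q3 = "BNB"
  · rw [if_neg h0, if_neg h1, if_neg h2, if_neg h3, if_neg h4, if_neg h5, if_neg h6, if_pos h7, if_neg (not_or.mpr ⟨h0, not_or.mpr ⟨h1, not_or.mpr ⟨h2, not_or.mpr ⟨h3, h4⟩⟩⟩⟩), if_pos (Or.inr (Or.inr (Or.inl h7))), h7]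
  by_cases h8 : q3 = "EUR"
  · rw [if_neg h0, if_neg h1, if_neg h2, if_neg h3, if_neg h4, if_neg h5, if_neg h6, if_neg h7, if_pos h8, if_neg (not_or.mpr ⟨h0, not_or.mpr ⟨h1, not_or.mpr ⟨h2, not_or.mpr ⟨h3, h4⟩⟩⟩⟩), if_pos (Or.inr (Or.inr (Or.inr (Or.inl h8)))), h8]
  by_cases h9 : q3 = "GBP"
  · rw [if_neg h0, if_neg h1, if_neg h2, if_neg h3, if_neg h4, if_neg h5, if_neg h6, if_neg h7, if_neg h8, if_pos h9, if_neg (not_or.mpr ⟨h0, not_or.mpr ⟨h1, not_or.mpr ⟨h2, not_or.mpr ⟨h3, h4⟩⟩⟩⟩), if_pos (Or.inr (Or.inr (Or.inr (Or.inr (Or.inl h9))))), h9]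
  by_cases h10 : q3 = "AUD"
  · rw [if_neg h0, if_neg h1, if_neg h2, if_neg h3, if_neg h4, if_neg h5, if_neg h6, if_neg h7, if_neg h8, if_neg h9, if_pos h10, if_neg (not_or.mpr ⟨h0, not_or.mpr ⟨h1, not_or.mpr ⟨h2, not_or.mpr ⟨h3, h4⟩⟩⟩⟩), if_pos (Or.inr (Or.inr (Or.inr (Or.inr (Or.inr (Or.inl h10)))))), h10]
  by_cases h11 : q3 = "USD"
  · rw [if_neg h0, if_neg h1, if_neg h2, if_neg h3, if_neg h4, if_neg h5, if_neg h6, if_neg h7, if_neg h8, if_neg h9, if_neg h10, if_pos h11, if_neg (not_or.mpr ⟨h0, not_or.mpr ⟨h1, not_or.mpr ⟨h2, not_or.mpr ⟨h3, h4⟩⟩⟩⟩), if_pos (Or.inr (Or.inr (Or.inr (Or.inr (Or.inr (Or.inr (Or.inl h11))))))), h11]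
  by_cases h12 : q3 = "TRY"
  · rw [if_neg h0, if_neg h1, if_neg h2, if_neg h3, if_neg h4, if_neg h5, if_neg h6, if_neg h7, if_neg h8, if_neg h9, if_neg h10, if_neg h11, if_pos h12, if_neg (not_or.mpr ⟨h0, not_or.mpr ⟨h1, not_or.mpr ⟨h2, not_or.mpr ⟨h3, h4⟩⟩⟩⟩), if_pos (Or.inr (Or.inr (Or.inr (Or.inr (Or.inr (Or.inr (Or.inr (Or.inl h12)))))))), h12]
  by_cases h13 : q3 = "ZAR"
  · rw [if_neg h0, if_neg h1, if_neg h2, if_neg h3, if_neg h4, if_neg h5, if_neg h6, if_neg h7, if_neg h8, if_neg h9, if_neg h10, if_neg h11, if_neg h12, if_pos h13, if_neg (not_or.mpr ⟨h0, not_or.mpr ⟨h1, not_or.mpr ⟨h2, not_or.mpr ⟨h3, h4⟩⟩⟩⟩), if_pos (Or.inr (Or.inr (Or.inr (Or.inr (Or.inr (Or.inr (Or.inr (Or.inr (Or.inl h13))))))))), h13]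
  by_cases h14 : q3 = "UAH"
  · rw [if_neg h0, if_neg h1, if_neg h2, if_neg h3, if_neg h4, if_neg h5, if_neg h6, if_neg h7, if_neg h8, if_neg h9, if_neg h10, if_neg h11, if_neg h12, if_neg h13, if_pos h14, if_neg (not_or.mpr ⟨h0, not_or.mpr ⟨h1, not_or.mpr ⟨h2, not_or.mpr ⟨h3, h4⟩⟩⟩⟩), if_pos (Or.inr (Or.inr (Or.inr (Or.inr (Or.inr (Or.inr (Or.inr (Or.inr (Or.inr (Or.inl h14)))))))))), h14]
  by_cases h15 : q3 = "NGN"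
  · rw [if_neg h0, if_neg h1, if_neg h2, if_neg h3, if_neg h4, if_neg h5, if_neg h6, if_neg h7, if_neg h8, if_neg h9, if_neg h10, if_neg h11, if_neg h12, if_neg h13, if_neg h14, if_pos h15, if_neg (not_or.mpr ⟨h0, not_or.mpr ⟨h1, not_or.mpr ⟨h2, not_or.mpr ⟨h3, h4⟩⟩⟩⟩), if_pos (Or.inr (Or.inr (Or.inr (Or.inr (Or.inr (Or.inr (Or.inr (Or.inr (Or.inr (Or.inr (h15))))))))))), h15]
  rw [if_neg h0, if_neg h1, if_neg h2, if_neg h3, if_neg h4, if_neg h5, if_neg h6, if_neg h7, if_neg h8, if_neg h9, if_neg h10, if_neg h11, if_neg h12, if_neg h13, if_neg h14, if_neg h15, if_neg (not_or.mpr ⟨h0, not_or.mpr ⟨h1, not_or.mpr ⟨h2, not_or.mpr ⟨h3, h4⟩⟩⟩⟩), if_neg (not_or.mpr ⟨h5, not_or.mpr ⟨h6, not_or.mpr ⟨h7, not_or.mpr ⟨h8, not_or.mpr ⟨h9, not_or.mpr ⟨h10, not_or.mpr ⟨h11, not_or.mpr ⟨h12, not_or.mpr ⟨h13, not_or.mpr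 ⟨h14, h15⟩⟩⟩⟩⟩⟩⟩⟩⟩⟩)]
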